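-- pv_equiv track=rewrite | github.com/sundeepansen/kriya | dna_mapping.py | encode_to_dna
-- ===== SOURCE A (Python) =====
-- def generate_dna_mapping():
--     dna_mapping = {}
--
--     min_ascii = 0
--     max_ascii = 127
--
--     for i in range(min_ascii, max_ascii):
--         character = chr(i)
--         dna_sequence = ""
--
--         # Convert ASCII character to binary
--         binary = bin(i)[2:].zfill(7)
--
--         # Map binary digits to DNA bases
--         for bit in binary:
--             if bit == '0':
--                 dna_sequence += 'A'
--             else:
--                 dna_sequence += 'T'
--
--         dna_mapping[character] = dna_sequence
--
--     return dna_mapping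
--
-- def encode_to_dna(text):
--     # Generate the DNA mapping dictionary
--     dna_mapping = generate_dna_mapping()
--
--     encoded_dna = ""
--     for char in text:
--         # Check if the character exists in the DNA mapping
--         if char in dna_mapping:
--             encoded_dna += dna_mapping[char]
--         else:
--             # Handle characters not in the DNA mapping
--             encoded_dna += "N"
--
--     return encoded_dna
-- ===== SOURCE B (Python) =====
-- _TR = str.maketrans('01', 'AT')
--
-- def encode_to_dna(text):
--     pieces = []
--     for char in text:
--         o = ord(char)
--         if o < 127:
--             pieces.append(format(o, '07b').translate(_TR))
--         else:
--             pieces.append('N')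
--     return ''.join(pieces)
-- ===== Notes on version B (the rewrite author's own statement) =====
-- stated objective: simpler
-- what changed: Drops the precomputed 127-entry mapping dictionary entirely and computes each character's 7-bit binary code directly, translating bits to bases with a str.translate table and joining collected pieces.
import Mathlib
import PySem

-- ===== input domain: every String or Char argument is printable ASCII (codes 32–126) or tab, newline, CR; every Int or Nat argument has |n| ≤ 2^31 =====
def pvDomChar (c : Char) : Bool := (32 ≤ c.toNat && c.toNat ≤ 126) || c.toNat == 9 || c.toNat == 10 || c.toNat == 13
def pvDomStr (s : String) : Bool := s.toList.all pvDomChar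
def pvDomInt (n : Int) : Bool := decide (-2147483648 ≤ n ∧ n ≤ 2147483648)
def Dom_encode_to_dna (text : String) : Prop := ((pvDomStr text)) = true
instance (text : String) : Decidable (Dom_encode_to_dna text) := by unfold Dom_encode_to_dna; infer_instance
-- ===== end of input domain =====

-- B drops A's precomputed mapping dictionary and computes each character's 7-bit code directly (simpler; return value only).

-- ===== PORT A =====
-- bin(i)[2:]  (most-significant bit first; '0' for i = 0)
def pvBinDigits (i : Nat) : List Char := Nat.toDigits 2 i

def generate_dna_mapping : PySem.Dict Char String :=
  (PySem.List.pyRange 0 127 1).foldl (fun d i =>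
    let character := Char.ofNat i.toNat
    -- binary = bin(i)[2:].zfill(7)
    let binary := List.replicate (7 - (pvBinDigits i.toNat).length) '0' ++ pvBinDigits i.toNat
    let dna_sequence := binary.foldl (fun acc bit => if bit = '0' then acc ++ "A" else acc ++ "T") ""
    d.insert character dna_sequence) PySem.Dict.empty

def encode_to_dna (text : String) : String :=
  let dna_mapping := generate_dna_mapping
  text.toList.foldl (fun encoded_dna char =>
    if dna_mapping.contains char then encoded_dna ++ (dna_mapping.get? char).getD ""
    else encoded_dna ++ "N") ""

-- ===== PORT B =====
-- format(o, '07b') followed by translate('0'->'A','1'->'T')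
def pvPieceB (char : Char) : String :=
  let o := char.toNat
  if o < 127 then
    String.ofList (((List.range 7).map (fun k => if o.testBit (6 - k) then '1' else '0')).map
      (fun b => if b = '0' then 'A' else 'T'))
  else "N"

def encode_to_dna_alt (text : String) : String :=
  String.join (text.toList.map pvPieceB)

-- ===== PRECONDITION & SPEC =====
def Spec_encode_to_dna (text : String) (out : String) : Prop := out = encode_to_dna_alt text
instance (text : String) (out : String) : Decidable (Spec_encode_to_dna text out) := by unfold Spec_encode_to_dna; infer_instance

-- ===== CLAIM (what is proved, stated in full; the proofs are below) =====
def Claim_equal_encode_to_dna : Prop := ∀ (text : String), Dom_encode_to_dna text → Spec_encode_to_dna text (encode_to_dna text)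

-- ===== LEMMAS AND PROOFS =====

-- A's per-character contribution
def pvPieceA (char : Char) : String :=
  if generate_dna_mapping.contains char then (generate_dna_mapping.get? char).getD "" else "N"

set_option maxRecDepth 4000 in
lemma pieces_eq_on_table : ∀ n ∈ List.range 127, pvPieceA (Char.ofNat n) = pvPieceB (Char.ofNat n) := by
  decide

lemma piece_eq (c : Char) (h : pvDomChar c = true) : pvPieceA c = pvPieceB c := by
  have hlt : c.toNat < 127 := by
    simp only [pvDomChar, Bool.or_eq_true, Bool.and_eq_true, decide_eq_true_eq, beq_iff_eq] at h
    omega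
  have hv : Char.ofNat c.toNat = c := Char.ofNat_toNat c
  have := pieces_eq_on_table c.toNat (List.mem_range.mpr hlt)
  rwa [hv] at this

lemma foldl_append_shift (l : List String) (x y : String) :
    l.foldl (· ++ ·) (x ++ y) = x ++ l.foldl (· ++ ·) y := by
  induction l generalizing y with
  | nil => simp
  | cons a t ih =>
    simp only [List.foldl_cons, String.append_assoc, ih]

lemma join_cons (a : String) (l : List String) :
    String.join (a :: l) = a ++ String.join l := by
  have h := foldl_append_shift l a ""
  simpa [String.join] using h

lemma foldl_append_join (g : Char → String) (l : List Char) (s : String) :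
    l.foldl (fun acc c => acc ++ g c) s = s ++ String.join (l.map g) := by
  induction l generalizing s with
  | nil => simp [String.join]
  | cons c t ih =>
    simp only [List.foldl_cons, List.map_cons, join_cons, ih, String.append_assoc]

-- ===== VERDICT (by name: the statement is the Claim_ definition above) =====
theorem encode_to_dna_spec : Claim_equal_encode_to_dna := by
  intro text hdom
  unfold Spec_encode_to_dna encode_to_dna encode_to_dna_alt
  have hstep : (fun (encoded_dna : String) (char : Char) =>
      if generate_dna_mapping.contains char then encoded_dna ++ (generate_dna_mapping.get? char).getD ""
      else encoded_dna ++ "N") = fun acc c => acc ++ pvPieceA c := by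
    funext acc c
    unfold pvPieceA
    split <;> rfl
  simp only [hstep, foldl_append_join]
  have hmap : text.toList.map pvPieceA = text.toList.map pvPieceB := by
    apply List.map_congr_left
    intro c hc
    apply piece_eq
    exact List.all_eq_true.mp hdom c hc
  simp [hmap]
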